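-- pv_equiv track=rewrite | github.com/FranRovi/Algorithms | Leet_Code/Easy/maximizeExpressionOfThreeElements.py | maximizeExpressionOfThree
-- ===== SOURCE A (Python) =====
-- def maximizeExpressionOfThree(nums):
--     sorted_nums = sorted(nums)
--     positive_arr = []
--     negative_arr = []
--     for n in sorted_nums:
--         if n <= 0:
--             negative_arr.append(n)
--         else:
--             positive_arr.append(n)
--     if len(negative_arr) == 0:
--         return positive_arr[-1] + positive_arr[-2] - positive_arr[0]
--     elif len(positive_arr) == 0:
--         return negative_arr[-1] + negative_arr[-2] - negative_arr[0]
--     elif len(positive_arr) == 1: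
--         return positive_arr[-1] + negative_arr[-1] - negative_arr[0]
--     else:
--         return positive_arr[-1] + positive_arr[-2] - negative_arr[0]
-- ===== SOURCE B (Python) =====
-- def maximizeExpressionOfThree(nums):
--     hi = max(nums)
--     rest = list(nums)
--     rest.remove(hi)
--     return hi + max(rest) - min(nums)
-- ===== Notes on version B (the rewrite author's own statement) =====
-- stated objective: simpler
-- what changed: A's sort + sign-partition + four-way case split collapses to three linear scans with no sort: the result is always (largest) + (second largest) - (smallest), computed with max/remove/max/min.
import Mathlib
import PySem

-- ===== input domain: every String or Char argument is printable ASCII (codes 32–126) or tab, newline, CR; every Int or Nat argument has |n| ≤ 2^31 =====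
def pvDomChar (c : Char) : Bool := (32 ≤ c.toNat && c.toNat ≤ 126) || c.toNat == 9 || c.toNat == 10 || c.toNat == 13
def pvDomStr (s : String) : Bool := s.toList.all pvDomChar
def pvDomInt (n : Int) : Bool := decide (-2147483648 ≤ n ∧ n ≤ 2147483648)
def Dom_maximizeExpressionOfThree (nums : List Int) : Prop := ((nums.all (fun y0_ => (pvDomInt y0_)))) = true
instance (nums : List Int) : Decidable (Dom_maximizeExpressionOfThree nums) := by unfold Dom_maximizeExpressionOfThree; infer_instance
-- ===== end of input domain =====

-- B replaces A's sort + sign-partition + four-way case split by plain order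
-- statistics (max, remove one max, max of the rest, min): the result is always
-- largest + second largest - smallest.  Objective: simpler.

-- ===== PORT A =====
-- literal port of A: sort, partition by sign appending, branch on the two lengths;
-- list indexing is pyGetD with default 0 — the default is only reached where Python
-- raises IndexError (length < 2), excluded by Pre_.
def maximizeExpressionOfThree (nums : List Int) : Int :=
  let sorted_nums := PySem.List.sorted nums (fun x => x) false
  let arrs := sorted_nums.foldl
    (fun (acc : List Int × List Int) n =>
      if n ≤ 0 then (acc.1 ++ [n], acc.2) else (acc.1, acc.2 ++ [n])) ([], [])
  let negative_arr := arrs.1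
  let positive_arr := arrs.2
  if negative_arr.length = 0 then
    PySem.List.pyGetD positive_arr (-1) 0 + PySem.List.pyGetD positive_arr (-2) 0
      - PySem.List.pyGetD positive_arr 0 0
  else if positive_arr.length = 0 then
    PySem.List.pyGetD negative_arr (-1) 0 + PySem.List.pyGetD negative_arr (-2) 0
      - PySem.List.pyGetD negative_arr 0 0
  else if positive_arr.length = 1 then
    PySem.List.pyGetD positive_arr (-1) 0 + PySem.List.pyGetD negative_arr (-1) 0
      - PySem.List.pyGetD negative_arr 0 0
  else
    PySem.List.pyGetD positive_arr (-1) 0 + PySem.List.pyGetD positive_arr (-2) 0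
      - PySem.List.pyGetD negative_arr 0 0

-- ===== PORT B =====
-- literal port of Source B: hi = max(nums); rest = copy with one hi removed; hi + max(rest) - min(nums);
-- the .getD defaults are only reached where Python raises (length < 2), excluded by Pre_.
def maximizeExpressionOfThree_alt (nums : List Int) : Int :=
  let hi := (PySem.List.max? nums (fun x => x)).getD 0
  let rest := (PySem.List.remove? nums hi).getD []
  hi + (PySem.List.max? rest (fun x => x)).getD 0 - (PySem.List.min? nums (fun x => x)).getD 0

-- ===== PRECONDITION & SPEC =====
-- Python A raises IndexError (and B ValueError) exactly when len(nums) < 2.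
def Pre_maximizeExpressionOfThree (nums : List Int) : Prop := 2 ≤ nums.length
instance (nums : List Int) : Decidable (Pre_maximizeExpressionOfThree nums) := by
  unfold Pre_maximizeExpressionOfThree; infer_instance
def pvWitness_maximizeExpressionOfThree : List Int := [1, -2, 3]
def Spec_maximizeExpressionOfThree (nums : List Int) (out : Int) : Prop := out = maximizeExpressionOfThree_alt nums
instance (nums : List Int) (out : Int) : Decidable (Spec_maximizeExpressionOfThree nums out) := by unfold Spec_maximizeExpressionOfThree; infer_instance

-- ===== CLAIM (what is proved, stated in full; the proofs are below) =====
def Claim_equal_maximizeExpressionOfThree : Prop := ∀ (nums : List Int), Dom_maximizeExpressionOfThree nums → Pre_maximizeExpressionOfThree nums → Spec_maximizeExpressionOfThree nums (maximizeExpressionOfThree nums)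

-- ===== LEMMAS AND PROOFS =====

-- A's partition loop is filter on each side.
lemma partition_foldl (l : List Int) (acc : List Int × List Int) :
    l.foldl (fun (acc : List Int × List Int) n =>
      if n ≤ 0 then (acc.1 ++ [n], acc.2) else (acc.1, acc.2 ++ [n])) acc
    = (acc.1 ++ l.filter (fun n => decide (n ≤ 0)),
       acc.2 ++ l.filter (fun n => !decide (n ≤ 0))) := by
  induction l generalizing acc with
  | nil => simp
  | cons x t ih =>
    by_cases hx : x ≤ 0 <;> simp [hx, ih]

-- a ≤-sorted list is its nonpositive part followed by its positive part
lemma sorted_split (l : List Int) (h : l.Pairwise (· ≤ ·)) :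
    l.filter (fun n => decide (n ≤ 0)) ++ l.filter (fun n => !decide (n ≤ 0)) = l := by
  induction l with
  | nil => simp
  | cons x t ih =>
    rcases List.pairwise_cons.mp h with ⟨hx, ht⟩
    by_cases h0 : x ≤ 0
    · simp only [List.filter_cons, h0, decide_true, Bool.not_true]
      simp [ih ht]
    · have hall : ∀ y ∈ t, ¬ y ≤ 0 := fun y hy => by
        have := hx y hy; omega
      simp only [List.filter_cons, h0, decide_false, Bool.not_false]
      rw [List.filter_eq_nil_iff.mpr (by intro y hy; simpa using hall y hy),
          List.filter_eq_self.mpr (by intro y hy; simpa using hall y hy)]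
      simp

lemma pyGetD_neg_two_append (u : List Int) (y z d : Int) :
    PySem.List.pyGetD (u ++ [y, z]) (-2) d = y := by
  rw [PySem.List.pyGetD_neg_ofNat (u ++ [y, z]) 2 d (by omega) (by simp)]
  simp

lemma max?_eq_of_isMax (l : List Int) (m : Int) (hm : m ∈ l) (hmax : ∀ x ∈ l, x ≤ m) :
    PySem.List.max? l (fun x => x) = some m := by
  cases h : PySem.List.max? l (fun x => x) with
  | none =>
    rw [PySem.List.max?_eq_none_iff] at h
    subst h; simp at hm
  | some m' =>
    have h1 : m ≤ m' := PySem.List.max?_isMax h m hm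
    have h2 : m' ≤ m := hmax m' (PySem.List.max?_mem h)
    rw [le_antisymm h2 h1]

lemma min?_eq_of_isMin (l : List Int) (m : Int) (hm : m ∈ l) (hmin : ∀ x ∈ l, m ≤ x) :
    PySem.List.min? l (fun x => x) = some m := by
  cases h : PySem.List.min? l (fun x => x) with
  | none =>
    rw [PySem.List.min?_eq_none_iff] at h
    subst h; simp at hm
  | some m' =>
    have h1 : m' ≤ m := PySem.List.min?_isMin h m hm
    have h2 : m ≤ m' := hmin m' (PySem.List.min?_mem h)
    rw [le_antisymm h1 h2]

-- head of a nonempty prefix of c :: s2 is c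
lemma pyGetD_head_of_append_cons (N P s2 : List Int) (c : Int) (hne : N ≠ [])
    (h : N ++ P = c :: s2) : PySem.List.pyGetD N 0 0 = c := by
  cases N with
  | nil => exact absurd rfl hne
  | cons n0 N1 =>
    rw [List.cons_append] at h
    injection h with h1 _
    rw [PySem.List.pyGetD_zero_cons, h1]

-- A evaluates to last + second-to-last - head of the sorted list.
lemma A_eval (nums u s2 : List Int) (y z c : Int)
    (hsu : PySem.List.sorted nums (fun x => x) false = u ++ [y, z])
    (hsc : PySem.List.sorted nums (fun x => x) false = c :: s2) :
    maximizeExpressionOfThree nums = z + y - c := by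
  have hpw : (PySem.List.sorted nums (fun x => x) false).Pairwise (· ≤ ·) := by
    simpa using PySem.List.sorted_pairwise nums (fun x => x)
  have hsplit := sorted_split (PySem.List.sorted nums (fun x => x) false) hpw
  set s := PySem.List.sorted nums (fun x => x) false with hs
  set N := s.filter (fun n => decide (n ≤ 0)) with hNdef
  set P := s.filter (fun n => !decide (n ≤ 0)) with hPdef
  -- the three order statistics of s itself
  have e1 : PySem.List.pyGetD s (-1) 0 = z := by
    rw [hsu, show u ++ [y, z] = (u ++ [y]) ++ [z] by simp]
    exact PySem.List.pyGetD_neg_one_append_singleton _ _ _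
  have e2 : PySem.List.pyGetD s (-2) 0 = y := by
    rw [hsu]; exact pyGetD_neg_two_append u y z 0
  have e3 : PySem.List.pyGetD s 0 0 = c := by
    rw [hsc]; exact PySem.List.pyGetD_zero_cons _ _ _
  simp only [maximizeExpressionOfThree, partition_foldl, List.nil_append, ← hs, ← hNdef, ← hPdef]
  by_cases hN0 : N.length = 0
  · -- no nonpositive elements: positive_arr is all of s
    have hPs : P = s := by
      rw [← hsplit, List.length_eq_zero_iff.mp hN0, List.nil_append]
    rw [if_pos hN0, hPs, e1, e2, e3]
  · rw [if_neg hN0]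
    have hNne : N ≠ [] := fun h => hN0 (by rw [h]; rfl)
    by_cases hP0 : P.length = 0
    · -- no positive elements: negative_arr is all of s
      have hNs : N = s := by
        rw [← hsplit, List.length_eq_zero_iff.mp hP0, List.append_nil]
      rw [if_pos hP0, hNs, e1, e2, e3]
    · rw [if_neg hP0]
      by_cases hP1 : P.length = 1
      · -- exactly one positive element p: s = N ++ [p], so p = z and N ends in y
        rw [if_pos hP1]
        obtain ⟨p, hp⟩ : ∃ p, P = [p] := List.length_eq_one_iff.mp hP1
        have hkey : N ++ [p] = (u ++ [y]) ++ [z] := by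
          rw [← hp, hsplit, hsu]; simp
        obtain ⟨hNuy, hpz⟩ := List.append_inj' hkey (by simp)
        injection hpz with hpz _
        have v1 : PySem.List.pyGetD P (-1) 0 = z := by
          rw [hp, show [p] = [] ++ [p] by simp, PySem.List.pyGetD_neg_one_append_singleton, hpz]
        have v2 : PySem.List.pyGetD N (-1) 0 = y := by
          rw [hNuy]; exact PySem.List.pyGetD_neg_one_append_singleton _ _ _
        have v3 : PySem.List.pyGetD N 0 0 = c := by
          apply pyGetD_head_of_append_cons N P s2 c hNne
          rw [hsplit, hsc]
        rw [v1, v2, v3]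
      · -- at least two positives: the top two of s are both in P
        rw [if_neg hP1]
        rcases hrP : P.reverse with _ | ⟨z2, _ | ⟨y2, w2⟩⟩
        · exact absurd (by simpa using congrArg List.length hrP) hP0
        · exact absurd (by simpa using congrArg List.length hrP) hP1
        · have hPv : P = w2.reverse ++ [y2, z2] := by
            have := congrArg List.reverse hrP
            simpa using this
          have hkey : (N ++ w2.reverse) ++ [y2, z2] = u ++ [y, z] := by
            rw [← hsu, ← hsplit, hPv]; simp
          obtain ⟨-, h2⟩ := List.append_inj' hkey (by simp)
          injection h2 with hy2 h2
          injection h2 with hz2 _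
          have v1 : PySem.List.pyGetD P (-1) 0 = z := by
            rw [hPv, show w2.reverse ++ [y2, z2] = (w2.reverse ++ [y2]) ++ [z2] by simp,
                PySem.List.pyGetD_neg_one_append_singleton, hz2]
          have v2 : PySem.List.pyGetD P (-2) 0 = y := by
            rw [hPv, pyGetD_neg_two_append, hy2]
          have v3 : PySem.List.pyGetD N 0 0 = c := by
            apply pyGetD_head_of_append_cons N P s2 c hNne
            rw [hsplit, hsc]
          rw [v1, v2, v3]

-- B evaluates to the same three order statistics.
lemma B_eval (nums u s2 : List Int) (y z c : Int)
    (hsu : PySem.List.sorted nums (fun x => x) false = u ++ [y, z])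
    (hsc : PySem.List.sorted nums (fun x => x) false = c :: s2) :
    maximizeExpressionOfThree_alt nums = z + y - c := by
  have hperm : (PySem.List.sorted nums (fun x => x) false).Perm nums :=
    PySem.List.sorted_perm nums (fun x => x) false
  have hpw : (PySem.List.sorted nums (fun x => x) false).Pairwise (· ≤ ·) := by
    simpa using PySem.List.sorted_pairwise nums (fun x => x)
  -- order facts from sortedness
  have hpw' := hpw
  rw [hsu, List.pairwise_append] at hpw'
  rcases hpw' with ⟨-, hyz', hub⟩
  have hyz : y ≤ z := by
    have := List.pairwise_cons.mp hyz'
    simpa using this.1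
  have hy2 : ∀ x ∈ u ++ [y], x ≤ y := by
    intro x hx
    rcases List.mem_append.mp hx with hxu | hxy
    · exact hub x hxu y (by simp)
    · simp at hxy; omega
  have hz : ∀ x ∈ PySem.List.sorted nums (fun x => x) false, x ≤ z := by
    intro x hx
    rw [hsu] at hx
    rcases List.mem_append.mp hx with hxu | hxy
    · exact hub x hxu z (by simp)
    · rcases List.mem_cons.mp hxy with h | h
      · omega
      · simp at h; omega
  have hcmin : ∀ x ∈ PySem.List.sorted nums (fun x => x) false, c ≤ x := by
    intro x hx
    rw [hsc] at hx
    rcases List.mem_cons.mp hx with h | h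
    · omega
    · have := List.pairwise_cons.mp (hsc ▸ hpw)
      exact this.1 x h
  -- max(nums) = z
  have hzs : z ∈ PySem.List.sorted nums (fun x => x) false := by rw [hsu]; simp
  have hznums : z ∈ nums := hperm.mem_iff.mp hzs
  have hmaxz : PySem.List.max? nums (fun x => x) = some z :=
    max?_eq_of_isMax nums z hznums (fun x hx => hz x (hperm.mem_iff.mpr hx))
  -- rest = nums.erase z
  have hremove : PySem.List.remove? nums z = some (nums.erase z) :=
    PySem.List.remove?_eq_some_erase nums z hznums
  have hep : ((PySem.List.sorted nums (fun x => x) false).erase z).Perm (nums.erase z) :=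
    hperm.erase z
  -- y is the max of the rest
  have hymem : y ∈ (PySem.List.sorted nums (fun x => x) false).erase z := by
    rw [← List.count_pos_iff]
    by_cases hyeq : y = z
    · rw [hyeq, List.count_erase_self]
      have h2 : 2 ≤ (PySem.List.sorted nums (fun x => x) false).count z := by
        rw [hsu, show u ++ [y, z] = (u ++ [y]) ++ [z] by simp, List.count_append]
        have h1 : 0 < (u ++ [y]).count z := List.count_pos_iff.mpr (by rw [← hyeq]; simp)
        have h3 : List.count z [z] = 1 := by simp
        omega
      omega
    · rw [List.count_erase_of_ne hyeq]
      apply List.count_pos_iff.mpr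
      rw [hsu]; simp
  have hymax : ∀ x ∈ (PySem.List.sorted nums (fun x => x) false).erase z, x ≤ y := by
    intro x hx
    by_cases hxy : x ≤ y
    · exact hxy
    · exfalso
      have hxs := List.mem_of_mem_erase hx
      rw [hsu, show u ++ [y, z] = (u ++ [y]) ++ [z] by simp] at hxs
      rcases List.mem_append.mp hxs with h | h
      · exact hxy (hy2 x h)
      · simp at h
        subst h
        have hz2 : 0 < ((PySem.List.sorted nums (fun x => x) false).erase x).count x :=
          List.count_pos_iff.mpr hx
        rw [List.count_erase_self] at hz2
        have : 2 ≤ (PySem.List.sorted nums (fun x => x) false).count x := by omega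
        rw [hsu, show u ++ [y, x] = (u ++ [y]) ++ [x] by simp, List.count_append] at this
        have h3 : List.count x [x] = 1 := by simp
        have hmem : x ∈ u ++ [y] := List.count_pos_iff.mp (by omega)
        exact hxy (hy2 x hmem)
  have hmaxy : PySem.List.max? (nums.erase z) (fun x => x) = some y :=
    max?_eq_of_isMax _ y (hep.mem_iff.mp hymem) (fun x hx => hymax x (hep.mem_iff.mpr hx))
  -- min(nums) = c
  have hcs : c ∈ PySem.List.sorted nums (fun x => x) false := by rw [hsc]; simp
  have hminc : PySem.List.min? nums (fun x => x) = some c :=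
    min?_eq_of_isMin nums c (hperm.mem_iff.mp hcs)
      (fun x hx => hcmin x (hperm.mem_iff.mpr hx))
  simp only [maximizeExpressionOfThree_alt, hmaxz, Option.getD_some, hremove, hmaxy, hminc]

-- ===== VERDICT (by name: the statement is the Claim_ definition above) =====
theorem maximizeExpressionOfThree_spec : Claim_equal_maximizeExpressionOfThree := by
  intro nums _ hpre
  unfold Spec_maximizeExpressionOfThree
  have hlen : 2 ≤ (PySem.List.sorted nums (fun x => x) false).length := by
    rw [(PySem.List.sorted_perm nums (fun x => x) false).length_eq]
    exact hpre
  rcases hr : (PySem.List.sorted nums (fun x => x) false).reverse with _ | ⟨z, _ | ⟨y, w⟩⟩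
  · exfalso
    have h0 : (PySem.List.sorted nums (fun x => x) false).length = 0 := by
      simpa using congrArg List.length hr
    omega
  · exfalso
    have h0 : (PySem.List.sorted nums (fun x => x) false).length = 1 := by
      simpa using congrArg List.length hr
    omega
  · have hsu : PySem.List.sorted nums (fun x => x) false = w.reverse ++ [y, z] := by
      have := congrArg List.reverse hr
      simpa using this
    rcases hc : PySem.List.sorted nums (fun x => x) false with _ | ⟨c, s2⟩
    · exfalso; rw [hc] at hlen; simp at hlen
    · rw [A_eval nums w.reverse s2 y z c hsu hc, B_eval nums w.reverse s2 y z c hsu hc]
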